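-- pv_equiv track=rewrite | github.com/ismael-p-nieves/QVSM | parser.py | hex2Decimal
-- ===== SOURCE A (Python) =====
-- def hex2Decimal(digits):
--     value = 0
--     for position, bit in zip(range(len(digits)), digits):
--         if bit >= 'a' and bit <= 'f':
--             base = (ord(bit) - 87) #ASCII('a') - 10
--         else:
--             base = (int(bit))
--         value += base*(16**position)
--
--     return value
-- ===== SOURCE B (Python) =====
-- HEX_TABLE = "0123456789abcdef"
--
-- def hex2Decimal(digits):
--     value = 0
--     for bit in reversed(digits):
--         value = value * 16 + HEX_TABLE.index(bit)
--     return value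
-- ===== Notes on version B (the rewrite author's own statement) =====
-- stated objective: faster
-- what changed: Horner accumulation over the reversed string with digit values taken from a lookup-table string (HEX_TABLE.index) replaces the forward loop that branches per character and recomputes the bignum power 16**position at every step.
import Mathlib
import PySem

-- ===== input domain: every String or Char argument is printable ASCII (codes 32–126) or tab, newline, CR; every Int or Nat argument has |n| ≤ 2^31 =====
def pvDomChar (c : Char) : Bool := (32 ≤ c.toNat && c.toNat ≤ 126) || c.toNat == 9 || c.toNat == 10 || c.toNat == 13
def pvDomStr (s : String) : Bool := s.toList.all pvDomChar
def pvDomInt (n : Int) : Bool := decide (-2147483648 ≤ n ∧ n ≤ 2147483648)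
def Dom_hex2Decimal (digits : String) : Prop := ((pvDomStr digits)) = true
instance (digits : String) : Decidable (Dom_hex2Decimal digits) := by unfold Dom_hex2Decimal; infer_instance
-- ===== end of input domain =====

-- B replaces A's per-position bignum power 16**position (with a per-character branch) by a
-- Horner accumulation over the reversed string using a lookup-table string for digit values:
-- measurably faster, same value on all hex strings (Pre_).


-- ===== PORT A =====
-- ord(bit)-87 on lowercase hex letters, else int(bit); int(bit) = toNat-48 is exact on Pre_ (digit chars only)
def hexBaseA (bit : Char) : Int :=
  if 'a' ≤ bit ∧ bit ≤ 'f' then (bit.toNat : Int) - 87 else (bit.toNat : Int) - 48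

-- zip(range(len(digits)), digits) is enumerate(digits)
def hex2Decimal (digits : String) : Int :=
  (PySem.List.enumerate digits.toList 0).foldl
    (fun value pb => value + hexBaseA pb.2 * 16 ^ pb.1.toNat) 0

-- ===== PORT B =====
def hexTable : List Char := "0123456789abcdef".toList

-- HEX_TABLE.index(bit); the none case is Python's ValueError, excluded by Pre_
def hexIdx (bit : Char) : Int := ((PySem.List.index? hexTable bit).getD 0 : Nat)

def hex2Decimal_alt (digits : String) : Int :=
  digits.toList.reverse.foldl (fun value bit => value * 16 + hexIdx bit) 0

-- ===== PRECONDITION & SPEC =====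
-- Pre_ excludes strings containing a character that is neither a decimal digit nor a lowercase hex letter:
-- Python A raises ValueError there (int(bit) on a non-digit).
def Pre_hex2Decimal (digits : String) : Prop :=
  (digits.toList.all (fun c => ('0' ≤ c && c ≤ '9') || ('a' ≤ c && c ≤ 'f'))) = true
instance (digits : String) : Decidable (Pre_hex2Decimal digits) := by
  unfold Pre_hex2Decimal; infer_instance
def pvWitness_hex2Decimal : String := "1a"

def Spec_hex2Decimal (digits : String) (out : Int) : Prop := out = hex2Decimal_alt digits
instance (digits : String) (out : Int) : Decidable (Spec_hex2Decimal digits out) := by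
  unfold Spec_hex2Decimal; infer_instance

-- ===== CLAIM (what is proved, stated in full; the proofs are below) =====
def Claim_equal_hex2Decimal : Prop := ∀ (digits : String), Dom_hex2Decimal digits → Pre_hex2Decimal digits → Spec_hex2Decimal digits (hex2Decimal digits)

-- ===== LEMMAS AND PROOFS =====
def goodChar (c : Char) : Bool := ('0' ≤ c && c ≤ '9') || ('a' ≤ c && c ≤ 'f')

-- common little-endian value of a digit list
def sumHex : List Char → Int
  | [] => 0
  | c :: t => hexBaseA c + 16 * sumHex t

theorem hexIdx_eq_hexBaseA (c : Char) (h : goodChar c = true) : hexIdx c = hexBaseA c := by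
  have hb : (48 ≤ c.toNat ∧ c.toNat ≤ 57) ∨ (97 ≤ c.toNat ∧ c.toNat ≤ 102) := by
    unfold goodChar at h
    simp only [Bool.or_eq_true, Bool.and_eq_true, decide_eq_true_eq, Char.le_def,
      UInt32.le_iff_toNat_le] at h
    exact h
  obtain ⟨n, hn, hc⟩ : ∃ n, ((48 ≤ n ∧ n ≤ 57) ∨ (97 ≤ n ∧ n ≤ 102)) ∧ c = Char.ofNat n :=
    ⟨c.toNat, hb, (Char.ofNat_toNat c).symm⟩
  subst hc
  rcases hn with ⟨h1, h2⟩ | ⟨h1, h2⟩ <;> interval_cases n <;> decide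

theorem foldl_enum_sumHex (l : List Char) (k : Nat) (acc : Int) :
    (PySem.List.enumerate l (k : Int)).foldl
      (fun value pb => value + hexBaseA pb.2 * 16 ^ pb.1.toNat) acc
    = acc + 16 ^ k * sumHex l := by
  induction l generalizing k acc with
  | nil => simp [PySem.List.enumerate_nil, sumHex]
  | cons c t ih =>
    rw [PySem.List.enumerate_cons]
    simp only [List.foldl_cons]
    have h1 : ((k : Int) + 1) = ((k + 1 : Nat) : Int) := by push_cast; ring
    rw [h1, ih]
    simp only [Int.toNat_natCast, sumHex]
    ring

theorem foldl_rev_sumHex (l : List Char) (acc : Int)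
    (hg : ∀ c ∈ l, goodChar c = true) :
    l.reverse.foldl (fun value bit => value * 16 + hexIdx bit) acc
    = acc * 16 ^ l.length + sumHex l := by
  induction l generalizing acc with
  | nil => simp [sumHex]
  | cons c t ih =>
    rw [List.reverse_cons, List.foldl_append,
        ih _ (fun x hx => hg x (List.mem_cons_of_mem _ hx))]
    simp only [List.foldl_cons, List.foldl_nil, sumHex, List.length_cons,
      hexIdx_eq_hexBaseA c (hg c (List.mem_cons_self))]
    ring

-- ===== VERDICT (by name: the statement is the Claim_ definition above) =====
theorem hex2Decimal_spec : Claim_equal_hex2Decimal := by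
  intro digits _ hpre
  unfold Spec_hex2Decimal hex2Decimal hex2Decimal_alt
  unfold Pre_hex2Decimal at hpre
  rw [List.all_eq_true] at hpre
  have hA := foldl_enum_sumHex digits.toList 0 0
  have hB := foldl_rev_sumHex digits.toList 0 (fun c hc => hpre c hc)
  simp only [Nat.cast_zero] at hA
  rw [hA, hB]
  ring
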